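-- pv_equiv track=rewrite | github.com/kkarakas-lxera/lxera-vision-platform | openai_course_generator/_archive/old_generators/intelligent_course_planner.py | _identify_transferable_skills
-- ===== SOURCE A (Python) =====
-- from typing import Dict, Any, List, Tuple
--
-- def _identify_transferable_skills(skills: List[str]) -> List[Dict[str, str]]:
--     """Identify transferable skills and their relevance to target role."""
--
--     transferable = []
--
--     for skill in skills:
--         skill_lower = skill.lower()
--
--         if "project management" in skill_lower:
--             transferable.append({
--                 "skill": skill,
--                 "relevance": "high",
--                 "application": "Managing financial analysis projects and reporting timelines"
--             })
--         elif "data analysis" in skill_lower: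
--             transferable.append({
--                 "skill": skill,
--                 "relevance": "very_high",
--                 "application": "Analyzing financial data and creating insights"
--             })
--         elif "stakeholder management" in skill_lower:
--             transferable.append({
--                 "skill": skill,
--                 "relevance": "high",
--                 "application": "Collaborating with business units and presenting financial insights"
--             })
--
--     return transferable
-- ===== SOURCE B (Python) =====
-- from typing import List, Dict
--
-- _RULES = [
--     ("project management", "high",
--      "Managing financial analysis projects and reporting timelines"),
--     ("data analysis", "very_high",
--      "Analyzing financial data and creating insights"),
--     ("stakeholder management", "high",
--      "Collaborating with business units and presenting financial insights"),
-- ]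
--
-- def _identify_transferable_skills(skills: List[str]) -> List[Dict[str, str]]:
--     """Rule-major passes: each rule fills still-empty slots; then compact."""
--     slots = [(skill, None) for skill in skills]
--     for pattern, relevance, application in _RULES:
--         slots = [(skill,
--                   {"skill": skill, "relevance": relevance,
--                    "application": application}
--                   if entry is None and pattern in skill.lower() else entry)
--                  for skill, entry in slots]
--     return [entry for _, entry in slots if entry is not None]
-- ===== Notes on version B (the rewrite author's own statement) =====
-- stated objective: alternative
-- what changed: Inverts the loop nesting: instead of scanning rules per skill with an if/elif chain, B makes one pass per rule over a parallel slot list, filling only still-empty slots (preserving first-match priority), and finally compacts the slots into the result list.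
import Mathlib
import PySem

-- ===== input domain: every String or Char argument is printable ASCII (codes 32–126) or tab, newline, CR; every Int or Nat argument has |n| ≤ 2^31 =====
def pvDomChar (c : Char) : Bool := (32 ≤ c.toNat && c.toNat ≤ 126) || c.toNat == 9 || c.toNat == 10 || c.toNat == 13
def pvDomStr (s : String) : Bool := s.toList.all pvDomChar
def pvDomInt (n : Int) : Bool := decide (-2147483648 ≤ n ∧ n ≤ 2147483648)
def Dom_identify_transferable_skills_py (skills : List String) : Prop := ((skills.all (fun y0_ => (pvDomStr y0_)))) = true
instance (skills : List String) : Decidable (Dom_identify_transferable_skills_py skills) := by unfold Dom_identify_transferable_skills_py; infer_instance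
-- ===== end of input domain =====

-- B inverts the loop nesting: one pass per rule over a parallel slot list, filling still-empty slots, then a compaction pass (alternative structure; same cost).

-- ===== PORT A =====
def identify_transferable_skills_py (skills : List String) : List (List (String × String)) :=
  skills.foldl (fun transferable skill =>
    let skill_lower := PySem.Str.lower skill
    if PySem.Str.isIn "project management" skill_lower then
      transferable ++ [[("skill", skill), ("relevance", "high"),
        ("application", "Managing financial analysis projects and reporting timelines")]]
    else if PySem.Str.isIn "data analysis" skill_lower then
      transferable ++ [[("skill", skill), ("relevance", "very_high"),
        ("application", "Analyzing financial data and creating insights")]]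
    else if PySem.Str.isIn "stakeholder management" skill_lower then
      transferable ++ [[("skill", skill), ("relevance", "high"),
        ("application", "Collaborating with business units and presenting financial insights")]]
    else transferable) []

-- ===== PORT B =====
def pvRules : List (String × String × String) :=
  [("project management", "high",
    "Managing financial analysis projects and reporting timelines"),
   ("data analysis", "very_high",
    "Analyzing financial data and creating insights"),
   ("stakeholder management", "high",
    "Collaborating with business units and presenting financial insights")]

-- one pass of a single rule over the slot list (fills still-empty slots)
def pvFillPass (r : String × String × String)
    (slots : List (String × Option (List (String × String)))) :
    List (String × Option (List (String × String))) :=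
  slots.map (fun p =>
    if p.2.isNone && PySem.Str.isIn r.1 (PySem.Str.lower p.1) then
      (p.1, some [("skill", p.1), ("relevance", r.2.1), ("application", r.2.2)])
    else p)

def identify_transferable_skills_py_alt (skills : List String) : List (List (String × String)) :=
  let slots := skills.map (fun s => (s, (none : Option (List (String × String)))))
  let filled := pvRules.foldl (fun acc r => pvFillPass r acc) slots
  filled.filterMap (fun p => p.2)

-- ===== PRECONDITION & SPEC =====
def Spec_identify_transferable_skills_py (skills : List String) (out : List (List (String × String))) : Prop := out = identify_transferable_skills_py_alt skills
instance (skills : List String) (out : List (List (String × String))) : Decidable (Spec_identify_transferable_skills_py skills out) := by unfold Spec_identify_transferable_skills_py; infer_instance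

-- ===== CLAIM (what is proved, stated in full; the proofs are below) =====
def Claim_equal_identify_transferable_skills_py : Prop := ∀ (skills : List String), Dom_identify_transferable_skills_py skills → Spec_identify_transferable_skills_py skills (identify_transferable_skills_py skills)

-- ===== LEMMAS AND PROOFS =====

-- the first-match result for one skill (abstract normal form both ports are proved equal to)
def pvAux (skill : String) : List (List (String × String)) :=
  let low := PySem.Str.lower skill
  if PySem.Str.isIn "project management" low then
    [[("skill", skill), ("relevance", "high"),
      ("application", "Managing financial analysis projects and reporting timelines")]]
  else if PySem.Str.isIn "data analysis" low then
    [[("skill", skill), ("relevance", "very_high"),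
      ("application", "Analyzing financial data and creating insights")]]
  else if PySem.Str.isIn "stakeholder management" low then
    [[("skill", skill), ("relevance", "high"),
      ("application", "Collaborating with business units and presenting financial insights")]]
  else []

theorem pv_A_foldl (skills : List String) (acc : List (List (String × String))) :
    skills.foldl (fun transferable skill =>
      let skill_lower := PySem.Str.lower skill
      if PySem.Str.isIn "project management" skill_lower then
        transferable ++ [[("skill", skill), ("relevance", "high"),
          ("application", "Managing financial analysis projects and reporting timelines")]]
      else if PySem.Str.isIn "data analysis" skill_lower then
        transferable ++ [[("skill", skill), ("relevance", "very_high"),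
          ("application", "Analyzing financial data and creating insights")]]
      else if PySem.Str.isIn "stakeholder management" skill_lower then
        transferable ++ [[("skill", skill), ("relevance", "high"),
          ("application", "Collaborating with business units and presenting financial insights")]]
      else transferable) acc
    = acc ++ skills.flatMap pvAux := by
  induction skills generalizing acc with
  | nil => simp
  | cons s rest ih =>
    simp only [List.foldl_cons]
    rw [ih]
    simp only [pvAux, List.flatMap_cons]
    cases h1 : PySem.Str.isIn "project management" (PySem.Str.lower s) <;>
      cases h2 : PySem.Str.isIn "data analysis" (PySem.Str.lower s) <;>
        cases h3 : PySem.Str.isIn "stakeholder management" (PySem.Str.lower s) <;>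
          simp [h1, h2, h3, List.append_assoc]

-- fold-of-map commutes with cons: each rule pass acts elementwise
theorem pv_fold_map_cons (rules : List (String × String × String))
    (a : String × Option (List (String × String)))
    (l : List (String × Option (List (String × String)))) :
    rules.foldl (fun acc r => pvFillPass r acc) (a :: l)
    = (rules.foldl (fun x r =>
        if x.2.isNone && PySem.Str.isIn r.1 (PySem.Str.lower x.1) then
          (x.1, some [("skill", x.1), ("relevance", r.2.1), ("application", r.2.2)])
        else x) a)
      :: rules.foldl (fun acc r => pvFillPass r acc) l := by
  induction rules generalizing a l with
  | nil => simp
  | cons r rest ih =>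
    simp only [List.foldl_cons, pvFillPass, List.map_cons]
    exact ih _ _

theorem pv_fold_map_nil (rules : List (String × String × String)) :
    rules.foldl (fun acc r => pvFillPass r acc)
      ([] : List (String × Option (List (String × String)))) = [] := by
  induction rules with
  | nil => rfl
  | cons r rest ih => rw [List.foldl_cons]; exact ih

-- one skill through all rule passes: first matching rule wins
theorem pv_elem (s : String) :
    pvRules.foldl (fun x r =>
      if x.2.isNone && PySem.Str.isIn r.1 (PySem.Str.lower x.1) then
        (x.1, some [("skill", x.1), ("relevance", r.2.1), ("application", r.2.2)])
      else x) (s, none)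
    = (s, (pvAux s).head?) := by
  simp only [pvRules, pvAux, List.foldl_cons, List.foldl_nil]
  cases h1 : PySem.Str.isIn "project management" (PySem.Str.lower s) <;>
    cases h2 : PySem.Str.isIn "data analysis" (PySem.Str.lower s) <;>
      cases h3 : PySem.Str.isIn "stakeholder management" (PySem.Str.lower s) <;>
        (simp [PySem.Str.isIn, PySem.Str.toList_lower] at h1 h2 h3; simp [h1, h2, h3])

theorem pv_B_core (skills : List String) :
    ((pvRules.foldl (fun acc r => pvFillPass r acc)
        (skills.map (fun s => (s, (none : Option (List (String × String))))))).filterMap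
      (fun p => p.2)) = skills.flatMap pvAux := by
  induction skills with
  | nil => simp [pv_fold_map_nil]
  | cons s rest ih =>
    rw [List.map_cons, pv_fold_map_cons, pv_elem, List.filterMap_cons, List.flatMap_cons]
    cases h1 : PySem.Str.isIn "project management" (PySem.Str.lower s) <;>
      cases h2 : PySem.Str.isIn "data analysis" (PySem.Str.lower s) <;>
        cases h3 : PySem.Str.isIn "stakeholder management" (PySem.Str.lower s) <;>
          (simp [PySem.Str.isIn, PySem.Str.toList_lower] at h1 h2 h3; simp [pvAux, h1, h2, h3, ih])

theorem pv_B_flatMap (skills : List String) :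
    identify_transferable_skills_py_alt skills = skills.flatMap pvAux := by
  unfold identify_transferable_skills_py_alt
  exact pv_B_core skills

-- ===== VERDICT (by name: the statement is the Claim_ definition above) =====
theorem identify_transferable_skills_py_spec : Claim_equal_identify_transferable_skills_py := by
  intro skills _
  show identify_transferable_skills_py skills = _
  rw [pv_B_flatMap]
  simpa [identify_transferable_skills_py] using pv_A_foldl skills []
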